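-- pv_equiv track=rewrite | github.com/ABHISHEKGHARAMI/structer | string/basics/arrangeString1.py | arrangeString
-- ===== SOURCE A (Python) =====
-- def arrangeString(str1):
--     if len(list(str1)) == 0:
--         return ""
--     else:
--         l1 = list(str1)
--         lower = []
--         upper = []
--         for i in range(len(l1)):
--             if l1[i].isupper() == True:
--                 upper.append(l1[i])
--             else:
--                 lower.append(l1[i])
--         lower.sort()
--         upper.sort()
--
--         new_string = ""
--         j , k = 0 , 0
--         for i in range(len(l1)):
--             if l1[i].isupper() == True:
--                 new_string+=upper[j]
--                 j+=1
--             else: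
--                 new_string += lower[k]
--                 k+=1
--         return new_string
-- ===== SOURCE B (Python) =====
-- def arrangeString(str1):
--     # Counting sort over the ASCII alphabet instead of comparison sorting:
--     # count each character once, emit each class's characters in code order,
--     # then refill the original positions class by class.
--     counts = {}
--     for ch in str1:
--         counts[ch] = counts.get(ch, 0) + 1
--     upper_sorted = []
--     other_sorted = []
--     for code in range(128):
--         ch = chr(code)
--         n = counts.get(ch, 0)
--         if 'A' <= ch <= 'Z':
--             upper_sorted += [ch] * n
--         else:
--             other_sorted += [ch] * n
--     out = []
--     j, k = 0, 0
--     for ch in str1: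
--         if 'A' <= ch <= 'Z':
--             out.append(upper_sorted[j]); j += 1
--         else:
--             out.append(other_sorted[k]); k += 1
--     return "".join(out)
-- ===== Notes on version B (the rewrite author's own statement) =====
-- stated objective: alternative
-- what changed: Replaces the two comparison sorts (lower.sort()/upper.sort()) by a counting pass: a dict of character counts is built once, each case class's sorted sequence is emitted by scanning the 128 ASCII codes in order, and the original positions are refilled class by class.
import Mathlib
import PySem

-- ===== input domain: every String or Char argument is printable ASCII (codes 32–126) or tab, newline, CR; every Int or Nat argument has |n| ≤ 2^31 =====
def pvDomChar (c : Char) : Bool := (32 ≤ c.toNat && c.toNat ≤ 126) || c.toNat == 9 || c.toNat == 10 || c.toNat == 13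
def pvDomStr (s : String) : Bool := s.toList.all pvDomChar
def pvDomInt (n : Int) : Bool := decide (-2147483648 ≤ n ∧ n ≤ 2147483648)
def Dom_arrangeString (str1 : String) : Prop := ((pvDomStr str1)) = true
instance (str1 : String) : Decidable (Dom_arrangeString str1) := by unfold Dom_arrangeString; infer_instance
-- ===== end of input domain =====

-- B replaces A's two comparison sorts by one counting pass over the fixed ASCII
-- alphabet (counting sort) — a different algorithm of similar measured cost.

-- ===== PORT A =====
-- literal port of Source A: partition into lower/upper, sort each, refill positions.
-- upper[j] / lower[k] are always in range (each index counts exactly the elements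
-- put into that list by the first loop), so `getD _ ' '` never takes its default.
def arrangeString (str1 : String) : String :=
  if (str1.toList).length == 0 then "" else
    let l1 := str1.toList
    let lu : List Char × List Char :=
      l1.foldl (fun p c =>
        if PySem.Chars.isupper c == true then (p.1, p.2 ++ [c]) else (p.1 ++ [c], p.2))
        ([], [])
    let lower := PySem.List.sorted lu.1 (fun x => x) false
    let upper := PySem.List.sorted lu.2 (fun x => x) false
    let res : List Char × Nat × Nat :=
      l1.foldl (fun s c =>
        if PySem.Chars.isupper c == true then
          (s.1 ++ [upper.getD s.2.1 ' '], s.2.1 + 1, s.2.2)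
        else
          (s.1 ++ [lower.getD s.2.2 ' '], s.2.1, s.2.2 + 1))
        ([], 0, 0)
    String.ofList res.1

-- ===== PORT B =====
-- literal port of Source B: counter dict, counting-sort emission over codes 0..127,
-- then the position-refill loop.  upper_sorted[j] / other_sorted[k] are always in
-- range on Dom (ASCII input), so `getD _ ' '` never takes its default.
def arrangeString_alt (str1 : String) : String :=
  let counts : PySem.Dict Char Int :=
    str1.toList.foldl (fun d c => d.insert c (d.getD c 0 + 1)) PySem.Dict.empty
  let built : List Char × List Char :=
    (PySem.List.pyRange 0 128 1).foldl (fun p code =>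
      let ch := Char.ofNat code.toNat
      let n := counts.getD ch 0
      if 'A' ≤ ch && ch ≤ 'Z' then (p.1 ++ PySem.List.pyRepeat [ch] n, p.2)
      else (p.1, p.2 ++ PySem.List.pyRepeat [ch] n))
      ([], [])
  let res : List Char × Nat × Nat :=
    str1.toList.foldl (fun s c =>
      if 'A' ≤ c && c ≤ 'Z' then
        (s.1 ++ [built.1.getD s.2.1 ' '], s.2.1 + 1, s.2.2)
      else
        (s.1 ++ [built.2.getD s.2.2 ' '], s.2.1, s.2.2 + 1))
      ([], 0, 0)
  String.ofList res.1

-- ===== PRECONDITION & SPEC =====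
def Spec_arrangeString (str1 : String) (out : String) : Prop := out = arrangeString_alt str1
instance (str1 : String) (out : String) : Decidable (Spec_arrangeString str1 out) := by unfold Spec_arrangeString; infer_instance

-- ===== CLAIM (what is proved, stated in full; the proofs are below) =====
def Claim_equal_arrangeString : Prop := ∀ (str1 : String), Dom_arrangeString str1 → Spec_arrangeString str1 (arrangeString str1)

-- ===== LEMMAS AND PROOFS =====

theorem pvCharEq (a b : Char) (h : a.toNat = b.toNat) : a = b := by
  apply Char.ext; apply UInt32.toNat_inj.mp; exact h

theorem pvCharLe (a b : Char) (h : a.toNat ≤ b.toNat) : a ≤ b := by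
  rw [Char.le_def, UInt32.le_iff_toNat_le]; exact h

theorem pvCharToNatOfNat (n : Nat) (h : n < 128) : (Char.ofNat n).toNat = n := by
  have hv : n.isValidChar := Or.inl (by omega)
  simp [Char.ofNat, hv, Char.ofNatAux, Char.toNat]

theorem pvFlatMapIf (q : Char → Bool) (l : List Char) :
    l.flatMap (fun c => if q c then [c] else []) = l.filter q := by
  induction l with
  | nil => rfl
  | cons x xs ih => by_cases hx : q x <;> simp [hx, ih]

theorem pvPairFold {α β : Type} (f g : α → List β) (l : List α) : ∀ a b : List β,
    l.foldl (fun p x => (p.1 ++ f x, p.2 ++ g x)) (a, b) = (a ++ l.flatMap f, b ++ l.flatMap g) := by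
  induction l with
  | nil => intro a b; simp
  | cons x xs ih => intro a b; simp [ih]

theorem pvCountFilter (a : Char) (l : List Char) (p : Char → Bool) :
    (l.filter p).count a = if p a then l.count a else 0 := by
  induction l with
  | nil => simp
  | cons x xs ih => by_cases hx : p x <;> by_cases hax : x = a <;> simp_all

theorem pvCountAux (m : Nat → Nat) (c : Char) : ∀ N, N ≤ 128 →
    ((List.range N).flatMap (fun k => List.replicate (m k) (Char.ofNat k))).count c
      = if c.toNat < N then m c.toNat else 0 := by
  intro N
  induction N with
  | zero => simp
  | succ n ih =>
    intro hN
    rw [List.range_succ, List.flatMap_append, List.count_append, ih (by omega)]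
    simp only [List.flatMap_cons, List.flatMap_nil, List.append_nil, List.count_replicate]
    by_cases h2 : c.toNat = n
    · have he : Char.ofNat n = c := pvCharEq _ _ (by rw [pvCharToNatOfNat n (by omega), h2])
      simp [he, h2]
    · have hne : ¬ (Char.ofNat n = c) := by
        intro he
        apply h2
        rw [← he]
        exact pvCharToNatOfNat n (by omega)
      by_cases h1 : c.toNat < n
      · have h3 : c.toNat < n + 1 := by omega
        simp [hne, h1, h3]
      · have h3 : ¬ c.toNat < n + 1 := by omega
        simp [hne, h1, h3]

theorem pvPwAux (m : Nat → Nat) : ∀ N, N ≤ 128 →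
    ((List.range N).flatMap (fun k => List.replicate (m k) (Char.ofNat k))).Pairwise (· ≤ ·) := by
  intro N
  induction N with
  | zero => simp
  | succ n ih =>
    intro hN
    rw [List.range_succ, List.flatMap_append, List.pairwise_append]
    refine ⟨ih (by omega), ?_, ?_⟩
    · simp [List.pairwise_replicate]
    · intro a ha b hb
      simp only [List.flatMap_cons, List.flatMap_nil, List.append_nil] at hb
      have hb' : b = Char.ofNat n := List.eq_of_mem_replicate hb
      rcases List.mem_flatMap.mp ha with ⟨k, hk, hak⟩
      have ha' : a = Char.ofNat k := List.eq_of_mem_replicate hak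
      have hkn : k < n := List.mem_range.mp hk
      subst ha' hb'
      exact pvCharLe _ _ (by rw [pvCharToNatOfNat k (by omega), pvCharToNatOfNat n (by omega)]; omega)

-- counting sort over codes 0..127 names Python's sorted order
theorem pvCountingSort (xs : List Char) (h : ∀ c ∈ xs, c.toNat < 128) :
    PySem.List.sorted xs (fun x => x) false
      = (List.range 128).flatMap (fun k => List.replicate (xs.count (Char.ofNat k)) (Char.ofNat k)) := by
  apply PySem.List.sorted_id_eq_of_perm_of_pairwise
  · apply List.perm_iff_count.mpr
    intro c
    rw [pvCountAux (fun k => xs.count (Char.ofNat k)) c 128 (le_refl _)]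
    by_cases hc : c.toNat < 128
    · simp only [hc, if_true]
      congr 1
      exact pvCharEq _ _ (pvCharToNatOfNat c.toNat hc)
    · simp only [hc, if_false]
      symm
      rw [List.count_eq_zero]
      intro hmem
      exact hc (h c hmem)
  · exact pvPwAux _ 128 (le_refl _)

-- A's partition fold is the pair of filters
theorem pvPartition (l : List Char) :
    l.foldl (fun p c =>
        if PySem.Chars.isupper c == true then (p.1, p.2 ++ [c]) else (p.1 ++ [c], p.2)) ([], [])
      = (l.filter (fun c => !PySem.Chars.isupper c), l.filter (fun c => PySem.Chars.isupper c)) := by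
  have hf : (fun (p : List Char × List Char) c =>
        if PySem.Chars.isupper c == true then (p.1, p.2 ++ [c]) else (p.1 ++ [c], p.2))
      = (fun p c => (p.1 ++ (if (!PySem.Chars.isupper c) then [c] else []),
                     p.2 ++ (if PySem.Chars.isupper c then [c] else []))) := by
    funext p c
    by_cases h : PySem.Chars.isupper c <;> simp [h]
  rw [hf, pvPairFold, pvFlatMapIf, pvFlatMapIf]
  simp

-- B's build fold is the pair of counting-sort block lists
theorem pvBuild (l : List Char) :
    ((PySem.List.pyRange 0 128 1).foldl (fun p code =>
        let ch := Char.ofNat code.toNat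
        let n := (l.foldl (fun d c => d.insert c (d.getD c 0 + 1)) PySem.Dict.empty).getD ch 0
        if 'A' ≤ ch && ch ≤ 'Z' then (p.1 ++ PySem.List.pyRepeat [ch] n, p.2)
        else (p.1, p.2 ++ PySem.List.pyRepeat [ch] n)) ([], []))
      = ((List.range 128).flatMap (fun k =>
            List.replicate ((l.filter (fun c => PySem.Chars.isupper c)).count (Char.ofNat k)) (Char.ofNat k)),
         (List.range 128).flatMap (fun k =>
            List.replicate ((l.filter (fun c => !PySem.Chars.isupper c)).count (Char.ofNat k)) (Char.ofNat k))) := by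
  have hc : (l.foldl (fun d c => d.insert c (d.getD c 0 + 1)) PySem.Dict.empty) = PySem.Dict.counter l :=
    PySem.Dict.foldl_insert_getD_add_one_eq_counter l
  rw [hc]
  have hr : PySem.List.pyRange 0 128 1 = (List.range 128).map (Nat.cast) := by
    exact_mod_cast PySem.List.pyRange_zero_natCast 128
  rw [hr, List.foldl_map]
  have hf : (fun (p : List Char × List Char) (k : Nat) =>
        let ch := Char.ofNat ((k : Int)).toNat
        let n := (PySem.Dict.counter l).getD ch 0
        if 'A' ≤ ch && ch ≤ 'Z' then (p.1 ++ PySem.List.pyRepeat [ch] n, p.2)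
        else (p.1, p.2 ++ PySem.List.pyRepeat [ch] n))
      = (fun p k =>
          (p.1 ++ List.replicate ((l.filter (fun c => PySem.Chars.isupper c)).count (Char.ofNat k)) (Char.ofNat k),
           p.2 ++ List.replicate ((l.filter (fun c => !PySem.Chars.isupper c)).count (Char.ofNat k)) (Char.ofNat k))) := by
    funext p k
    have hn : ((k : Int)).toNat = k := Int.toNat_natCast k
    have hcount : (PySem.Dict.counter l).getD (Char.ofNat k) 0 = (l.count (Char.ofNat k) : Int) :=
      PySem.Dict.getD_counter l (Char.ofNat k)
    have hup : PySem.Chars.isupper (Char.ofNat k) = ('A' ≤ Char.ofNat k && Char.ofNat k ≤ 'Z') := rfl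
    simp only [hn, hcount, PySem.List.pyRepeat_singleton, Int.toNat_natCast]
    rw [pvCountFilter, pvCountFilter, ← hup]
    by_cases h : PySem.Chars.isupper (Char.ofNat k) <;> simp [h]
  rw [hf, pvPairFold]
  simp

theorem pvMain (s : String) (hdom : s.toList.all pvDomChar = true) :
    arrangeString s = arrangeString_alt s := by
  have h128 : ∀ c ∈ s.toList, c.toNat < 128 := by
    intro c hc
    have := List.all_eq_true.mp hdom c hc
    simp [pvDomChar] at this
    omega
  have htest : ∀ c : Char, (PySem.Chars.isupper c == true) = ('A' ≤ c && c ≤ 'Z') := by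
    intro c
    show (('A' ≤ c && c ≤ 'Z') == true) = ('A' ≤ c && c ≤ 'Z')
    simp
  by_cases h : s.toList = []
  · have hs : s = "" := String.toList_eq_nil_iff.mp h
    subst hs
    decide
  · have hlen : ((s.toList).length == 0) = false := by
      have hs2 : ¬ s = "" := fun he => h (by rw [he]; rfl)
      simp [hs2]
    rw [arrangeString, arrangeString_alt]
    simp only [hlen, Bool.false_eq_true, if_false]
    rw [pvPartition, pvBuild]
    simp only
    rw [pvCountingSort _ (fun c hc => h128 c (List.mem_filter.mp hc).1),
        pvCountingSort _ (fun c hc => h128 c (List.mem_filter.mp hc).1)]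
    simp only [htest]

-- ===== VERDICT (by name: the statement is the Claim_ definition above) =====
theorem arrangeString_spec : Claim_equal_arrangeString := by
  intro s hdom
  unfold Spec_arrangeString
  exact pvMain s hdom
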